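-- pv_equiv track=rewrite | github.com/joaojunior/hackerrank | leetcode/k-th-symbol-in-grammar/main.py | generate
-- ===== SOURCE A (Python) =====
-- def generate(string, n, N):
--     if n == N:
--         return string
--     else:
--         new_string = ''
--         for c in string:
--             if c == '0':
--                 new_string += '01'
--             else:
--                 new_string += '10'
--         return generate(new_string, n + 1, N)
-- ===== SOURCE B (Python) =====
-- def generate(string, n, N):
--     for _ in range(N - n):
--         string = ''.join('01' if c == '0' else '10' for c in string)
--     return string
-- ===== Notes on version B (the rewrite author's own statement) =====
-- stated objective: simpler
-- what changed: Replaces the recursion that grows a new string by repeated '+=' concatenation with a counted for-loop over range(N - n) that rebuilds the string once per level with a single ''.join over a per-character map.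
import Mathlib
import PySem

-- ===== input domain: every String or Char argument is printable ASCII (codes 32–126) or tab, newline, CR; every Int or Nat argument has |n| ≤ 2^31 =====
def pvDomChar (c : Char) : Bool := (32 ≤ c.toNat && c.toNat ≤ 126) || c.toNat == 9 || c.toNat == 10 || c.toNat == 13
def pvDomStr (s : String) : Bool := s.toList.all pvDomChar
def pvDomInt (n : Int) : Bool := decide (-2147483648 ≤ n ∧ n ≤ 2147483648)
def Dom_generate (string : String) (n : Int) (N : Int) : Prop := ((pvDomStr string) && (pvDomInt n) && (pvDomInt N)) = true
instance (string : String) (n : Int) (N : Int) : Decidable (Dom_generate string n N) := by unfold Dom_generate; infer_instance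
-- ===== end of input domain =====

-- B replaces A's recursion (building each level by repeated '+=' concatenation) with a
-- counted loop over range(N - n) that rebuilds the string once per level via ''.join;
-- objective: simpler. Pre_ excludes n > N, where A recurses forever (RecursionError).


-- ===== PORT A =====
-- "for c in string: new_string += '01' if c == '0' else '10'"  (ported on List Char)
def pvExpandA (s : List Char) : List Char :=
  s.foldl (fun acc c => acc ++ (if c = '0' then ['0', '1'] else ['1', '0'])) []

-- A's recursion, with fuel (N - n).toNat supplying termination; under Pre_generate
-- (n ≤ N) the fuel is exactly the number of recursive calls A makes, so the 0-fuel
-- branch is never taken on admitted inputs.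
def pvGenFuel : Nat → List Char → Int → Int → List Char
  | fuel, s, n, N =>
    if n = N then s
    else
      match fuel with
      | 0 => s
      | f + 1 => pvGenFuel f (pvExpandA s) (n + 1) N

def generate (string : String) (n : Int) (N : Int) : String :=
  String.ofList (pvGenFuel (N - n).toNat string.toList n N)

-- ===== PORT B =====
-- "''.join('01' if c == '0' else '10' for c in string)"
def pvExpandB (s : List Char) : List Char :=
  (s.map (fun c => if c = '0' then ['0', '1'] else ['1', '0'])).flatten

-- "for _ in range(N - n): string = ..."
def generate_alt (string : String) (n : Int) (N : Int) : String :=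
  String.ofList ((List.range (N - n).toNat).foldl (fun s _ => pvExpandB s) string.toList)

-- ===== PRECONDITION & SPEC =====
-- Pre_ excludes exactly n > N: there A never returns (it recurses until RecursionError).
def Pre_generate (string : String) (n : Int) (N : Int) : Prop := n ≤ N
instance (string : String) (n : Int) (N : Int) : Decidable (Pre_generate string n N) := by
  unfold Pre_generate; infer_instance

def pvWitness_generate : String × Int × Int := ("0", 1, 3)

def Spec_generate (string : String) (n : Int) (N : Int) (out : String) : Prop := out = generate_alt string n N
instance (string : String) (n : Int) (N : Int) (out : String) : Decidable (Spec_generate string n N out) := by unfold Spec_generate; infer_instance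

-- ===== CLAIM (what is proved, stated in full; the proofs are below) =====
def Claim_equal_generate : Prop := ∀ (string : String) (n : Int) (N : Int), Dom_generate string n N → Pre_generate string n N → Spec_generate string n N (generate string n N)

-- ===== LEMMAS AND PROOFS =====
theorem pvFoldl_append_eq_flatten (f : Char → List Char) :
    ∀ (l acc : List Char), l.foldl (fun a c => a ++ f c) acc = acc ++ (l.map f).flatten := by
  intro l
  induction l with
  | nil => simp
  | cons c t ih => intro acc; simp [List.foldl, ih]

theorem pvExpandA_eq_B (s : List Char) : pvExpandA s = pvExpandB s := by
  simp only [pvExpandA, pvExpandB]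
  exact pvFoldl_append_eq_flatten (fun c => if c = '0' then ['0', '1'] else ['1', '0']) s []

theorem pvFoldl_range_iterate (g : List Char → List Char) :
    ∀ (k : Nat) (s : List Char), (List.range k).foldl (fun t _ => g t) s = g^[k] s := by
  intro k
  induction k with
  | zero => intro s; simp
  | succ k ih =>
      intro s
      rw [List.range_succ, List.foldl_append, ih, Function.iterate_succ_apply']
      simp

theorem pvGenFuel_eq_iterate :
    ∀ (f : Nat) (s : List Char) (n N : Int), n ≤ N → (N - n).toNat = f →
      pvGenFuel f s n N = pvExpandB^[f] s := by
  intro f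
  induction f with
  | zero =>
      intro s n N hle hf
      have : n = N := by omega
      simp [pvGenFuel, this]
  | succ f ih =>
      intro s n N hle hf
      have hne : n ≠ N := by intro h; subst h; omega
      rw [pvGenFuel, if_neg hne]
      have h1 : n + 1 ≤ N := by omega
      have h2 : (N - (n + 1)).toNat = f := by omega
      rw [ih (pvExpandA s) (n + 1) N h1 h2, pvExpandA_eq_B, ← Function.iterate_succ_apply]

-- ===== VERDICT (by name: the statement is the Claim_ definition above) =====
theorem generate_spec : Claim_equal_generate := by
  intro string n N _ hpre
  unfold Spec_generate generate generate_alt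
  rw [pvGenFuel_eq_iterate (N - n).toNat string.toList n N hpre rfl,
    pvFoldl_range_iterate]
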